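-- pv_equiv track=rewrite | github.com/michaeldodman/speciality-insurance-pricing-algorithm | pricing_model_improved.py | front_load_list
-- ===== SOURCE A (Python) =====
-- def front_load_list(input_list: list[int], n: int) -> list[int]:
--     """
--     Generates a new list by front-loading values from the original list up to a specified limit.
--
--     Args:
--         input_list (list[int]): The original list of integers.
--         n (int): The limit for front-loading values.
--
--     Returns:
--         list[int]: The new list front-loaded up to the specified limit.
--     """
--     new_list = [0] * len(input_list)
--
--     total_added = 0
--     for i in range(len(input_list)):
--         while new_list[i] < input_list[i] and total_added < n:
--             new_list[i] += 1
--             total_added += 1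
--
--     return new_list
-- ===== SOURCE B (Python) =====
-- def front_load_list(input_list: list[int], n: int) -> list[int]:
--     out = []
--     total = 0
--     for v in input_list:
--         take = min(v, n - total)
--         if take < 0:
--             take = 0
--         out.append(take)
--         total += take
--     return out
-- ===== Notes on version B (the rewrite author's own statement) =====
-- stated objective: simpler
-- what changed: Replaced the per-unit inner while loop over a preallocated zero list by a single pass that assigns each element min(value, remaining budget) clamped at 0 and advances the running total.
import Mathlib
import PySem

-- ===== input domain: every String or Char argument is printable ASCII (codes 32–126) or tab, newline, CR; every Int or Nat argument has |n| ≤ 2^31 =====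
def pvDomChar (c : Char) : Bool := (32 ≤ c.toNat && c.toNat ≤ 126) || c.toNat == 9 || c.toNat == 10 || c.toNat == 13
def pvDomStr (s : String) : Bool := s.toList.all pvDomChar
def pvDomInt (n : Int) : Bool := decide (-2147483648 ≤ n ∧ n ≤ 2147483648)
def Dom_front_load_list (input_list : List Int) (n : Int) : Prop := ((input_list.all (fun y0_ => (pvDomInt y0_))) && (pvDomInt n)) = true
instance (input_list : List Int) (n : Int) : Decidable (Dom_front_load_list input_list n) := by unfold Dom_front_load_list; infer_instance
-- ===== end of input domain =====

-- B replaces A's per-unit inner while loop by one pass assigning min(value, remaining budget) clamped at 0: simpler, no unit-by-unit counting.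


-- ===== PORT A =====
-- inner 'while new_list[i] < input_list[i] and total_added < n' loop:
-- returns (final new_list[i], final total_added)
def flA_inner (v cur total n : Int) : Int × Int :=
  if h : cur < v ∧ total < n then flA_inner v (cur + 1) (total + 1) n
  else (cur, total)
termination_by (v - cur).toNat
decreasing_by omega

-- the for-loop over indices; new_list[i] is 0 before iteration i and untouched after,
-- so the state is the processed prefix plus total_added
def flA_go (l : List Int) (total n : Int) : List Int :=
  match l with
  | [] => []
  | v :: rest =>
    let p := flA_inner v 0 total n
    p.1 :: flA_go rest p.2 n

def front_load_list (input_list : List Int) (n : Int) : List Int :=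
  flA_go input_list 0 n

-- ===== PORT B =====
def flB_go (l : List Int) (total n : Int) : List Int :=
  match l with
  | [] => []
  | v :: rest =>
    let t0 := min v (n - total)
    let take := if t0 < 0 then 0 else t0
    take :: flB_go rest (total + take) n

def front_load_list_alt (input_list : List Int) (n : Int) : List Int :=
  flB_go input_list 0 n

-- ===== PRECONDITION & SPEC =====
def Spec_front_load_list (input_list : List Int) (n : Int) (out : List Int) : Prop := out = front_load_list_alt input_list n
instance (input_list : List Int) (n : Int) (out : List Int) : Decidable (Spec_front_load_list input_list n out) := by unfold Spec_front_load_list; infer_instance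

-- ===== CLAIM (what is proved, stated in full; the proofs are below) =====
def Claim_equal_front_load_list : Prop := ∀ (input_list : List Int) (n : Int), Dom_front_load_list input_list n → Spec_front_load_list input_list n (front_load_list input_list n)

-- ===== LEMMAS AND PROOFS =====

-- the inner while loop adds exactly d = max 0 (min (v - cur) (n - total)) units
theorem flA_inner_eq (v cur total n : Int) :
    flA_inner v cur total n =
      (cur + max 0 (min (v - cur) (n - total)), total + max 0 (min (v - cur) (n - total))) := by
  generalize hk : (v - cur).toNat = k
  induction k generalizing cur total with
  | zero =>
    rw [flA_inner]
    split
    · omega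
    · simp only [Prod.mk.injEq]; omega
  | succ k ih =>
    rw [flA_inner]
    split
    · rw [ih (cur + 1) (total + 1) (by omega)]
      simp only [Prod.mk.injEq]; omega
    · simp only [Prod.mk.injEq]; omega

theorem flA_go_eq (l : List Int) (total n : Int) : flA_go l total n = flB_go l total n := by
  induction l generalizing total with
  | nil => rfl
  | cons v rest ih =>
    simp only [flA_go, flB_go, flA_inner_eq]
    rw [ih]
    have h1 : 0 + max 0 (min (v - 0) (n - total)) = (if min v (n - total) < 0 then 0 else min v (n - total)) := by omega
    have h2 : total + max 0 (min (v - 0) (n - total)) = total + (if min v (n - total) < 0 then 0 else min v (n - total)) := by omega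
    rw [h1, h2]

-- ===== VERDICT (by name: the statement is the Claim_ definition above) =====
theorem front_load_list_spec : Claim_equal_front_load_list := by
  intro l n _
  unfold Spec_front_load_list front_load_list front_load_list_alt
  exact flA_go_eq l 0 n
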